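-- pv_equiv track=rewrite | github.com/Hiromu1612/machine_learning | 1bannyasasii/1_language/text_Markov.py | get_first_words_weights
-- ===== SOURCE A (Python) =====
-- from collections import defaultdict #キーが存在しない場合の辞書の初期値を設定できる
--
-- def get_first_word_count(three_words_count):
--     first_word_count=defaultdict(int) #キーが存在しない場合の初期値を0に設定
--     for three_words, count in three_words_count.items(): #itemsでキーと値を取り出す
--         if three_words[0]=="__BEGIN__": #最初の単語が__BEGIN__で始まるもののみ取り出す
--             next_word=three_words[1]
--             first_word_count[next_word]+=count #出現回数をカウント
--     return first_word_count
--
-- def get_first_words_weights(three_words_count):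
--     first_word_count=get_first_word_count(three_words_count)
--     words=[]
--     weights=[]
--     for word, count in first_word_count.items():
--         words.append(word)
--         weights.append(count)
--     return words, weights
-- ===== SOURCE B (Python) =====
-- def get_first_words_weights(three_words_count):
--     # Different decomposition: extract the BEGIN (word, count) pairs once, then
--     # dedup the words in first-seen order and aggregate each word's total by a sum.
--     begins = [(k[1], c) for k, c in three_words_count.items() if k[0] == "__BEGIN__"]
--     words = []
--     for w, _ in begins:
--         if w not in words:
--             words.append(w)
--     weights = [sum(c for x, c in begins if x == w) for w in words]
--     return words, weights
-- ===== Notes on version B (the rewrite author's own statement) =====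
-- stated objective: alternative
-- what changed: Replaces the defaultdict accumulation plus items-unpacking loop by a filter/extract pass, an ordered dedup of the next-words, and a per-word sum comprehension for the weights (no dict at all).
import Mathlib
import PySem

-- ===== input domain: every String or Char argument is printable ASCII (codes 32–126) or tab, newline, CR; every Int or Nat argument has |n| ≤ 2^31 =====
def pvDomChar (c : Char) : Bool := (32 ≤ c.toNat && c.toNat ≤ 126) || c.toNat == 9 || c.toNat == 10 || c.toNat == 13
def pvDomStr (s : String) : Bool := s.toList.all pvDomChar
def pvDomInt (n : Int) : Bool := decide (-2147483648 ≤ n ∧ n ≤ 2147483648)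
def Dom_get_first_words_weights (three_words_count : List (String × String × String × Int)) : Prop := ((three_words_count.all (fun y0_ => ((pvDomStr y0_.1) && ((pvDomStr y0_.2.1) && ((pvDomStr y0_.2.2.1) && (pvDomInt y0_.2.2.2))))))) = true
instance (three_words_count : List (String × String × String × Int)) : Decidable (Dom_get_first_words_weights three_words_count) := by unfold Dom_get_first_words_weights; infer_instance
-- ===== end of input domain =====

-- B replaces the dict accumulation by an ordered dedup plus per-word sums: a genuinely
-- different decomposition of the same aggregation (no speed claim).

-- ===== PORT A =====
def get_first_word_count (three_words_count : List (String × String × String × Int)) : PySem.Dict String Int :=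
  three_words_count.foldl (fun d t =>
    if t.1 == "__BEGIN__" then
      -- first_word_count[next_word] += count on a defaultdict(int)
      d.modify t.2.1 0 (fun v => v + t.2.2.2)
    else d) PySem.Dict.empty

def get_first_words_weights (three_words_count : List (String × String × String × Int)) : List String × List Int :=
  let fwc := get_first_word_count three_words_count
  fwc.items.foldl (fun (acc : List String × List Int) p => (acc.1 ++ [p.1], acc.2 ++ [p.2])) ([], [])

-- ===== PORT B =====
def get_first_words_weights_alt (three_words_count : List (String × String × String × Int)) : List String × List Int :=
  let begins := (three_words_count.filter (fun t => t.1 == "__BEGIN__")).map (fun t => (t.2.1, t.2.2.2))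
  let words := begins.foldl (fun ws p => if ws.contains p.1 then ws else ws ++ [p.1]) []
  let weights := words.map (fun w => ((begins.filter (fun p => p.1 == w)).map (fun p => p.2)).sum)
  (words, weights)

-- ===== PRECONDITION & SPEC =====
def Spec_get_first_words_weights (three_words_count : List (String × String × String × Int)) (out : List String × List Int) : Prop := out = get_first_words_weights_alt three_words_count
instance (three_words_count : List (String × String × String × Int)) (out : List String × List Int) : Decidable (Spec_get_first_words_weights three_words_count out) := by unfold Spec_get_first_words_weights; infer_instance

-- ===== CLAIM (what is proved, stated in full; the proofs are below) =====
def Claim_equal_get_first_words_weights : Prop := ∀ (three_words_count : List (String × String × String × Int)), Dom_get_first_words_weights three_words_count → Spec_get_first_words_weights three_words_count (get_first_words_weights three_words_count)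

-- ===== LEMMAS AND PROOFS =====

-- A's accumulated dict looked up at w is the sum of the counts recorded for w.
theorem getD_foldl_modify_add (l : List (String × Int)) (d : PySem.Dict String Int) (w : String) :
    (l.foldl (fun d p => d.modify p.1 0 (fun v => v + p.2)) d).getD w 0
      = d.getD w 0 + ((l.filter (fun p => p.1 == w)).map (fun p => p.2)).sum := by
  induction l generalizing d with
  | nil => simp
  | cons p l ih =>
    simp only [List.foldl_cons, ih, List.filter_cons]
    by_cases h : p.1 = w
    · subst h
      simp [PySem.Dict.getD_modify_self]
      ring
    · rw [PySem.Dict.getD_modify_of_ne _ _ _ (by simpa using fun e => h e.symm)]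
      simp [h]

theorem get_first_words_weights_spec : Claim_equal_get_first_words_weights := by
  intro twc _
  unfold Spec_get_first_words_weights get_first_words_weights get_first_words_weights_alt get_first_word_count
  -- name the extracted (word, count) pairs
  set l := (twc.filter (fun t => t.1 == "__BEGIN__")).map (fun t => (t.2.1, t.2.2.2)) with hl
  -- A's fold over twc is a fold over l
  have hfold : twc.foldl (fun d t =>
        if t.1 == "__BEGIN__" then d.modify t.2.1 0 (fun v => v + t.2.2.2) else d)
        PySem.Dict.empty
      = l.foldl (fun d p => d.modify p.1 0 (fun v => v + p.2)) PySem.Dict.empty := by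
    rw [hl, List.foldl_map, List.foldl_filter]
  rw [hfold]
  set D := l.foldl (fun d p => d.modify p.1 0 (fun v => v + p.2)) PySem.Dict.empty with hD
  have hnodup : D.keys.Nodup := by
    rw [hD]
    exact PySem.Dict.nodup_keys_foldl_modify_key l Prod.fst 0
      (fun _ p => fun v => v + p.2) _ PySem.Dict.nodup_keys_empty
  -- keys of D are the first-seen distinct words, i.e. B's words accumulator
  have hkeys : D.keys = l.foldl (fun ws p => if ws.contains p.1 then ws else ws ++ [p.1]) [] := by
    rw [hD, PySem.Dict.keys_foldl_modify_key, PySem.Dict.keys_empty,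
      PySem.Set.update_nil_left, PySem.Set.ofList_eq_foldl, List.foldl_map]
    rfl
  -- A's unpacking loop over items is (keys, values)
  rw [PySem.List.foldl_prod_mk (f := fun a (e : String × Int) => a ++ [e.1])
        (g := fun a (e : String × Int) => a ++ [e.2]),
      PySem.List.foldl_append_singleton_eq_map, PySem.List.foldl_append_singleton_eq_map]
  have hitems := PySem.Dict.items_eq_map_keys D hnodup 0
  rw [hitems]
  simp only [List.map_map]
  refine Prod.ext ?_ ?_
  · simpa [Function.comp_def] using hkeys
  · simp only [List.nil_append]
    rw [← hkeys]
    apply List.map_congr_left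
    intro w _
    simpa using getD_foldl_modify_add l PySem.Dict.empty w
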